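-- pv_equiv track=rewrite | github.com/Grumbel/dirtoo | dirtoo/find/util.py | replace_item
-- ===== SOURCE A (Python) =====
-- from typing import TYPE_CHECKING, cast, List, Any
--
-- def replace_item(lst: List[Any], needle: Any, replacements: List[Any]) -> List[Any]:
--     result: List[Any] = []
--     for i in lst:
--         if i == needle:
--             result += replacements
--         else:
--             result.append(i)
--     return result
-- ===== SOURCE B (Python) =====
-- def replace_item(lst, needle, replacements):
--     # Split lst into segments separated by needle, then rejoin with replacements.
--     segments = []
--     cur = []
--     for x in lst:
--         if x == needle:
--             segments.append(cur)
--             cur = []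
--         else:
--             cur.append(x)
--     segments.append(cur)
--     result = list(segments[0])
--     for g in segments[1:]:
--         result += replacements
--         result += g
--     return result
-- ===== Notes on version B (the rewrite author's own statement) =====
-- stated objective: alternative
-- what changed: B is two-phase: it first splits lst into segments separated by needle (keeping empty segments), then rejoins the segments with the replacement list, instead of A's single pass that substitutes in place.
import Mathlib
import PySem

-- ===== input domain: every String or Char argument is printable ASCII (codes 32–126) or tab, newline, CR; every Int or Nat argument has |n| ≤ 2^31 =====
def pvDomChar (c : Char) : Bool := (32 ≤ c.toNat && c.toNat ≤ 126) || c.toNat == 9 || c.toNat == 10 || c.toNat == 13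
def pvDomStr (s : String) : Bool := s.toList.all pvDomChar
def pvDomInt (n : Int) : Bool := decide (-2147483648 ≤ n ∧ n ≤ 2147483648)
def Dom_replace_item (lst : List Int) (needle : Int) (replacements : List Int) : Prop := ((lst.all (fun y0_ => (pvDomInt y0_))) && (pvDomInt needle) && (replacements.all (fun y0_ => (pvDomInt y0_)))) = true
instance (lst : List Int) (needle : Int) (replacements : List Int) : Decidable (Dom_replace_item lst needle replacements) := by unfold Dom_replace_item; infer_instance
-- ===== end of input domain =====

-- B splits the list into needle-separated segments, then rejoins them with the replacement list (alternative two-phase decomposition; same cost as A).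


-- ===== PORT A =====
-- A: single pass, appending replacements or the element itself.
def replace_item (lst : List Int) (needle : Int) (replacements : List Int) : List Int :=
  lst.foldl (fun result i => if i = needle then result ++ replacements else result ++ [i]) []

-- ===== PORT B =====
-- B phase 1: split into segments (state: segments so far, current segment).
def pvSplitSegs (lst : List Int) (needle : Int) : List (List Int) × List Int :=
  lst.foldl (fun st x => if x = needle then (st.1 ++ [st.2], []) else (st.1, st.2 ++ [x])) ([], [])

def replace_item_alt (lst : List Int) (needle : Int) (replacements : List Int) : List Int :=
  let p := pvSplitSegs lst needle
  match p.1 ++ [p.2] with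
  | [] => []  -- unreachable: the segment list always ends with the current segment
  | g :: rest => rest.foldl (fun result g' => result ++ replacements ++ g') g

-- ===== PRECONDITION & SPEC =====
def Spec_replace_item (lst : List Int) (needle : Int) (replacements : List Int) (out : List Int) : Prop := out = replace_item_alt lst needle replacements
instance (lst : List Int) (needle : Int) (replacements : List Int) (out : List Int) : Decidable (Spec_replace_item lst needle replacements out) := by unfold Spec_replace_item; infer_instance

-- ===== CLAIM (what is proved, stated in full; the proofs are below) =====
def Claim_equal_replace_item : Prop := ∀ (lst : List Int) (needle : Int) (replacements : List Int), Dom_replace_item lst needle replacements → Spec_replace_item lst needle replacements (replace_item lst needle replacements)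

-- ===== LEMMAS AND PROOFS =====

-- Rebuild a nonempty segment list, joining with `reps` (B's phase 2).
def pvRebuild (reps : List Int) : List (List Int) → List Int
  | [] => []
  | g :: rest => rest.foldl (fun result g' => result ++ reps ++ g') g

theorem pvRebuild_snoc (reps : List Int) (g : List Int) (rest : List (List Int)) (c : List Int) :
    pvRebuild reps (g :: (rest ++ [c])) = pvRebuild reps (g :: rest) ++ reps ++ c := by
  simp [pvRebuild, List.foldl_append]

theorem pvRebuild_last_append (reps : List Int) (segs : List (List Int)) (cur : List Int) (x : Int) :
    pvRebuild reps (segs ++ [cur ++ [x]]) = pvRebuild reps (segs ++ [cur]) ++ [x] := by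
  cases segs with
  | nil => simp [pvRebuild]
  | cons g rest =>
      simp only [List.cons_append]
      rw [pvRebuild_snoc, pvRebuild_snoc]
      simp [List.append_assoc]

-- Loop invariant connecting A's fold with B's split-then-rebuild.
theorem pvLoop_inv (needle : Int) (reps : List Int) :
    ∀ (lst : List Int) (segs : List (List Int)) (cur : List Int),
      (let p := lst.foldl (fun st x => if x = needle then (st.1 ++ [st.2], []) else (st.1, st.2 ++ [x])) (segs, cur);
       pvRebuild reps (p.1 ++ [p.2]))
      = lst.foldl (fun result i => if i = needle then result ++ reps else result ++ [i])
          (pvRebuild reps (segs ++ [cur])) := by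
  intro lst
  induction lst with
  | nil => intro segs cur; simp
  | cons x xs ih =>
      intro segs cur
      by_cases h : x = needle
      · simp only [List.foldl_cons, if_pos h]
        rw [ih (segs ++ [cur]) []]
        congr 1
        cases segs with
        | nil => simp [pvRebuild]
        | cons g rest =>
            have e : rest ++ cur :: ([] ++ [[]]) = (rest ++ [cur]) ++ [([] : List Int)] := by simp
            simp only [List.cons_append, List.append_assoc]
            rw [e, pvRebuild_snoc, pvRebuild_snoc]
            simp
      · simp only [List.foldl_cons, if_neg h]
        rw [ih segs (cur ++ [x]), pvRebuild_last_append]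

theorem alt_eq_rebuild (lst : List Int) (needle : Int) (reps : List Int) :
    replace_item_alt lst needle reps
      = pvRebuild reps ((pvSplitSegs lst needle).1 ++ [(pvSplitSegs lst needle).2]) := by
  rcases hs : pvSplitSegs lst needle with ⟨segs, cur⟩
  unfold replace_item_alt
  rw [hs]
  cases segs with
  | nil => simp [pvRebuild]
  | cons g rest => simp [pvRebuild]

-- ===== VERDICT (by name: the statement is the Claim_ definition above) =====
theorem replace_item_spec : Claim_equal_replace_item := by
  intro lst needle reps _
  unfold Spec_replace_item
  rw [alt_eq_rebuild]
  have := pvLoop_inv needle reps lst [] []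
  simp only [pvSplitSegs]
  rw [this]
  simp [pvRebuild, replace_item]
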